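-- pv_equiv track=rewrite | github.com/LucasLimaT/CyberEdux | ExerciciosDeQuinta-LucasTaveira/ConversorDeDatas.py | converter_data
-- ===== SOURCE A (Python) =====
-- def converter_data(data):
--     novaData = ""
--     mes = ""
--     for i in range(len(data)):
--         if i < 2:
--             novaData = novaData + data[i]
--         elif i == 2:
--             novaData = novaData + " de "
--         elif 2 < i and i < 5:
--             mes = mes + data[i]
--         elif i == 5:
--             if mes == "01":
--                 novaData += "Janeiro de "
--             if mes == "02":
--                 novaData += "Fevereiro de "
--             if mes == "03":
--                 novaData += "Marco de "
--             if mes == "04":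
--                 novaData += "Abril de "
--             if mes == "05":
--                 novaData += "Maio de "
--             if mes == "06":
--                 novaData += "Junho de "
--             if mes == "07":
--                 novaData += "Julho de "
--             if mes == "08":
--                 novaData += "Agosto de "
--             if mes == "09":
--                 novaData += "Setembro de "
--             if mes == "10":
--                 novaData += "Outubro de "
--             if mes == "11":
--                 novaData += "Novembro de "
--             if mes == "12":
--                 novaData += "Dezembro de "
--         else:
--             novaData = novaData + data[i]
--     return novaData
-- ===== SOURCE B (Python) =====
-- MONTHS = {
--     "01": "Janeiro de ", "02": "Fevereiro de ", "03": "Marco de ",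
--     "04": "Abril de ", "05": "Maio de ", "06": "Junho de ",
--     "07": "Julho de ", "08": "Agosto de ", "09": "Setembro de ",
--     "10": "Outubro de ", "11": "Novembro de ", "12": "Dezembro de ",
-- }
--
-- def converter_data(data):
--     resultado = data[:2]
--     if len(data) > 2:
--         resultado += " de "
--     if len(data) > 5:
--         resultado += MONTHS.get(data[3:5], "")
--     return resultado + data[6:]
-- ===== Notes on version B (the rewrite author's own statement) =====
-- stated objective: simpler
-- what changed: Replaced the char-by-char indexed loop with its state variables by direct slice-based assembly: the day slice, a conditional separator, a month-name dict lookup on the two month characters, and the tail slice.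
import Mathlib
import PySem

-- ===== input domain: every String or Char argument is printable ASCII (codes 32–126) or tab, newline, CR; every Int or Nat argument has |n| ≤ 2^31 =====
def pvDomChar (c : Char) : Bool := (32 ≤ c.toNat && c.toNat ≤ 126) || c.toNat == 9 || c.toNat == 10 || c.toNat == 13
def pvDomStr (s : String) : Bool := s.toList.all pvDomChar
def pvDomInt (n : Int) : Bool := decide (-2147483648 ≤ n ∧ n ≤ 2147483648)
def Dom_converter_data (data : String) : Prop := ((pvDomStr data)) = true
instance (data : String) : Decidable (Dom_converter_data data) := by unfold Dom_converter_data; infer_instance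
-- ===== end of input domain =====

-- B replaces A's char-by-char indexed loop by slice-based assembly with a month dict: objective = simpler.

-- ===== PORT A =====
-- Loop body of A, one step per index i; data[i] is ported as cs.getD i ' ' — exact
-- because the loop only visits i < len(data), so the index is always in range.
def pvStepA (cs : List Char) (st : List Char × List Char) (i : Nat) : List Char × List Char :=
  let novaData := st.1
  let mes := st.2
  if i < 2 then (novaData ++ [cs.getD i ' '], mes)
  else if i = 2 then (novaData ++ (" de ").toList, mes)
  else if 2 < i ∧ i < 5 then (novaData, mes ++ [cs.getD i ' '])
  else if i = 5 then
    -- twelve sequential (non-elif) ifs, as in A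
    let n1  := if mes = ("01").toList then novaData ++ ("Janeiro de ").toList else novaData
    let n2  := if mes = ("02").toList then n1 ++ ("Fevereiro de ").toList else n1
    let n3  := if mes = ("03").toList then n2 ++ ("Marco de ").toList else n2
    let n4  := if mes = ("04").toList then n3 ++ ("Abril de ").toList else n3
    let n5  := if mes = ("05").toList then n4 ++ ("Maio de ").toList else n4
    let n6  := if mes = ("06").toList then n5 ++ ("Junho de ").toList else n5
    let n7  := if mes = ("07").toList then n6 ++ ("Julho de ").toList else n6
    let n8  := if mes = ("08").toList then n7 ++ ("Agosto de ").toList else n7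
    let n9  := if mes = ("09").toList then n8 ++ ("Setembro de ").toList else n8
    let n10 := if mes = ("10").toList then n9 ++ ("Outubro de ").toList else n9
    let n11 := if mes = ("11").toList then n10 ++ ("Novembro de ").toList else n10
    let n12 := if mes = ("12").toList then n11 ++ ("Dezembro de ").toList else n11
    (n12, mes)
  else (novaData ++ [cs.getD i ' '], mes)

def converter_data (data : String) : String :=
  let cs := data.toList
  String.ofList (((List.range cs.length).foldl (pvStepA cs) ([], [])).1)

-- ===== PORT B =====
def pvMonths : PySem.Dict String String := PySem.Dict.mk
  [("01", "Janeiro de "), ("02", "Fevereiro de "), ("03", "Marco de "),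
   ("04", "Abril de "), ("05", "Maio de "), ("06", "Junho de "),
   ("07", "Julho de "), ("08", "Agosto de "), ("09", "Setembro de "),
   ("10", "Outubro de "), ("11", "Novembro de "), ("12", "Dezembro de ")]

def converter_data_alt (data : String) : String :=
  let cs := data.toList
  let r := PySem.List.slice cs none (some (2 : Int))
  let r := if cs.length > 2 then r ++ (" de ").toList else r
  let r := if cs.length > 5 then
      r ++ (PySem.Dict.getD pvMonths (String.ofList (PySem.List.slice cs (some (3 : Int)) (some (5 : Int)))) "").toList
    else r
  String.ofList (r ++ PySem.List.slice cs (some (6 : Int)) none)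

-- ===== PRECONDITION & SPEC =====
def Spec_converter_data (data : String) (out : String) : Prop := out = converter_data_alt data
instance (data : String) (out : String) : Decidable (Spec_converter_data data out) := by unfold Spec_converter_data; infer_instance

-- ===== CLAIM (what is proved, stated in full; the proofs are below) =====
def Claim_equal_converter_data : Prop := ∀ (data : String), Dom_converter_data data → Spec_converter_data data (converter_data data)

-- ===== LEMMAS AND PROOFS =====

theorem pvKeyBeq (k : String) (l : List Char) : (k == String.ofList l) = (l == k.toList) := by
  rw [Bool.eq_iff_iff]
  simp only [beq_iff_eq]
  constructor
  · intro h; subst h; simp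
  · intro h; rw [h]; simp

-- A's if-chain at i = 5 equals B's dict lookup on the two month characters.
theorem pvChain_eq (mes nd : List Char) :
    (let n1  := if mes = ("01").toList then nd ++ ("Janeiro de ").toList else nd
     let n2  := if mes = ("02").toList then n1 ++ ("Fevereiro de ").toList else n1
     let n3  := if mes = ("03").toList then n2 ++ ("Marco de ").toList else n2
     let n4  := if mes = ("04").toList then n3 ++ ("Abril de ").toList else n3
     let n5  := if mes = ("05").toList then n4 ++ ("Maio de ").toList else n4
     let n6  := if mes = ("06").toList then n5 ++ ("Junho de ").toList else n5
     let n7  := if mes = ("07").toList then n6 ++ ("Julho de ").toList else n6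
     let n8  := if mes = ("08").toList then n7 ++ ("Agosto de ").toList else n7
     let n9  := if mes = ("09").toList then n8 ++ ("Setembro de ").toList else n8
     let n10 := if mes = ("10").toList then n9 ++ ("Outubro de ").toList else n9
     let n11 := if mes = ("11").toList then n10 ++ ("Novembro de ").toList else n10
     let n12 := if mes = ("12").toList then n11 ++ ("Dezembro de ").toList else n11
     n12)
    = nd ++ (PySem.Dict.getD pvMonths (String.ofList mes) "").toList := by
  by_cases h1 : mes = ("01").toList
  · subst h1
    rw [show (PySem.Dict.getD pvMonths (String.ofList ("01").toList) "") = "Janeiro de " from by decide]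
    simp
  by_cases h2 : mes = ("02").toList
  · subst h2
    rw [show (PySem.Dict.getD pvMonths (String.ofList ("02").toList) "") = "Fevereiro de " from by decide]
    simp
  by_cases h3 : mes = ("03").toList
  · subst h3
    rw [show (PySem.Dict.getD pvMonths (String.ofList ("03").toList) "") = "Marco de " from by decide]
    simp
  by_cases h4 : mes = ("04").toList
  · subst h4
    rw [show (PySem.Dict.getD pvMonths (String.ofList ("04").toList) "") = "Abril de " from by decide]
    simp
  by_cases h5 : mes = ("05").toList
  · subst h5
    rw [show (PySem.Dict.getD pvMonths (String.ofList ("05").toList) "") = "Maio de " from by decide]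
    simp
  by_cases h6 : mes = ("06").toList
  · subst h6
    rw [show (PySem.Dict.getD pvMonths (String.ofList ("06").toList) "") = "Junho de " from by decide]
    simp
  by_cases h7 : mes = ("07").toList
  · subst h7
    rw [show (PySem.Dict.getD pvMonths (String.ofList ("07").toList) "") = "Julho de " from by decide]
    simp
  by_cases h8 : mes = ("08").toList
  · subst h8
    rw [show (PySem.Dict.getD pvMonths (String.ofList ("08").toList) "") = "Agosto de " from by decide]
    simp
  by_cases h9 : mes = ("09").toList
  · subst h9
    rw [show (PySem.Dict.getD pvMonths (String.ofList ("09").toList) "") = "Setembro de " from by decide]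
    simp
  by_cases h10 : mes = ("10").toList
  · subst h10
    rw [show (PySem.Dict.getD pvMonths (String.ofList ("10").toList) "") = "Outubro de " from by decide]
    simp
  by_cases h11 : mes = ("11").toList
  · subst h11
    rw [show (PySem.Dict.getD pvMonths (String.ofList ("11").toList) "") = "Novembro de " from by decide]
    simp
  by_cases h12 : mes = ("12").toList
  · subst h12
    rw [show (PySem.Dict.getD pvMonths (String.ofList ("12").toList) "") = "Dezembro de " from by decide]
    simp
  have g1 : mes ≠ ['0','1'] := h1
  have g2 : mes ≠ ['0','2'] := h2
  have g3 : mes ≠ ['0','3'] := h3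
  have g4 : mes ≠ ['0','4'] := h4
  have g5 : mes ≠ ['0','5'] := h5
  have g6 : mes ≠ ['0','6'] := h6
  have g7 : mes ≠ ['0','7'] := h7
  have g8 : mes ≠ ['0','8'] := h8
  have g9 : mes ≠ ['0','9'] := h9
  have g10 : mes ≠ ['1','0'] := h10
  have g11 : mes ≠ ['1','1'] := h11
  have g12 : mes ≠ ['1','2'] := h12
  simp [pvMonths, PySem.Dict.getD_eq_get?_getD, pvKeyBeq,
    g1, g2, g3, g4, g5, g6, g7, g8, g9, g10, g11, g12, PySem.Dict.get?]


-- the tail of the loop (i ≥ 6) only copies characters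
theorem pvFold_tail (cs : List Char) (m : Nat) (nd mes : List Char) :
    ((List.range m).map (fun j => 6 + j)).foldl (pvStepA cs) (nd, mes)
      = (nd ++ (List.range m).map (fun j => cs.getD (6 + j) ' '), mes) := by
  induction m generalizing nd with
  | zero => simp
  | succ m ih =>
    rw [List.range_succ, List.map_append, List.foldl_append, ih]
    simp only [List.map_cons, List.map_nil, List.foldl_cons, List.foldl_nil, pvStepA]
    rw [if_neg (by omega), if_neg (by omega), if_neg (by omega), if_neg (by omega)]
    simp

theorem pvMap_getD_range (l : List Char) (d : Char) :
    (List.range l.length).map (fun j => l.getD j d) = l := by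
  induction l with
  | nil => simp
  | cons x xs ih =>
    rw [List.length_cons, List.range_succ_eq_map, List.map_cons, List.map_map]
    simp only [List.getD_cons_zero]
    refine congrArg (x :: ·) ?_
    calc List.map ((fun j => (x :: xs).getD j d) ∘ Nat.succ) (List.range xs.length)
        = List.map (fun j => xs.getD j d) (List.range xs.length) := by
          apply List.map_congr_left; intro j hj; simp [Function.comp]
      _ = xs := ih

theorem pvStep5 (cs nd mes : List Char) :
    pvStepA cs (nd, mes) 5
      = (nd ++ (PySem.Dict.getD pvMonths (String.ofList mes) "").toList, mes) := by
  have h := pvChain_eq mes nd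
  simp only [pvStepA]
  rw [if_neg (by omega), if_neg (by omega), if_neg (by omega), if_pos trivial]
  exact congrArg (fun t => (t, mes)) h

-- ===== VERDICT (by name: the statement is the Claim_ definition above) =====
theorem converter_data_spec : Claim_equal_converter_data := by
  intro data _
  unfold Spec_converter_data converter_data converter_data_alt
  generalize data.toList = cs
  rcases cs with _ | ⟨a, _ | ⟨b, _ | ⟨c, _ | ⟨d, _ | ⟨e, _ | ⟨f, rest⟩⟩⟩⟩⟩⟩
  · simp [PySem.List.slice]
  · simp [pvStepA, List.range_succ, PySem.List.slice, PySem.List.clampIdx]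
  · simp [pvStepA, List.range_succ, PySem.List.slice, PySem.List.clampIdx]
  · simp [pvStepA, List.range_succ, PySem.List.slice, PySem.List.clampIdx]
  · simp [pvStepA, List.range_succ, PySem.List.slice, PySem.List.clampIdx]
  · simp [pvStepA, List.range_succ, PySem.List.slice, PySem.List.clampIdx]
  · -- length ≥ 6
    have hlen : (a::b::c::d::e::f::rest).length = 6 + rest.length := by simp; omega
    simp only []
    rw [hlen, List.range_add, List.foldl_append]
    have h6 : List.foldl (pvStepA (a::b::c::d::e::f::rest)) ([], []) (List.range 6)
        = ([a, b, ' ', 'd', 'e', ' ']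
            ++ (PySem.Dict.getD pvMonths (String.ofList [d, e]) "").toList, [d, e]) := by
      rw [show List.range 6 = [0,1,2,3,4] ++ [5] from by decide, List.foldl_append]
      rw [show List.foldl (pvStepA (a::b::c::d::e::f::rest)) ([], []) [0,1,2,3,4]
            = ([a, b, ' ', 'd', 'e', ' '], [d, e]) from by simp [pvStepA]]
      simp only [List.foldl_cons, List.foldl_nil]
      exact pvStep5 _ _ _
    rw [h6, pvFold_tail]
    have htail : (List.range rest.length).map (fun j => (a::b::c::d::e::f::rest).getD (6 + j) ' ')
        = rest := by
      have : ∀ j : Nat, (a::b::c::d::e::f::rest).getD (6 + j) ' ' = rest.getD j ' ' := by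
        intro j
        rw [show 6 + j = j + 1 + 1 + 1 + 1 + 1 + 1 from by omega]
        simp
      calc (List.range rest.length).map (fun j => (a::b::c::d::e::f::rest).getD (6 + j) ' ')
          = (List.range rest.length).map (fun j => rest.getD j ' ') :=
            List.map_congr_left (fun j _ => this j)
        _ = rest := pvMap_getD_range rest ' '
    rw [htail]
    have hslice1 : PySem.List.slice (a::b::c::d::e::f::rest) none (some (2 : Int))
        = [a, b] := by
      rw [PySem.List.slice_to]
      · rfl
      · norm_num
    have hslice2 : PySem.List.slice (a::b::c::d::e::f::rest) (some (3 : Int)) (some (5 : Int))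
        = [d, e] := by
      rw [PySem.List.slice_toNat]
      · rfl
      · norm_num
      · norm_num
    have hslice3 : PySem.List.slice (a::b::c::d::e::f::rest) (some (6 : Int)) none
        = rest := by
      rw [PySem.List.slice_from]
      · rfl
      · norm_num
    simp only [hslice1, hslice2, hslice3]
    rw [if_pos (by omega), if_pos (by omega)]
    simp
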